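-- pv_equiv track=rewrite | github.com/MarvinTaterra/Molecular-Mechanisms-and-Probe-Dependent-Effects-of-Clinically-Relevant-GABAA-Receptor-Modulators | Plumed2MDanalysis.py | canonical_mapping_from_distances
-- ===== SOURCE A (Python) =====
-- from collections import OrderedDict
--
-- def canonical_mapping_from_distances(distances_list_of_files):
--     """
--     Build canonical ordering for all unique label pairs across input lists.
--     Returns OrderedDict: {(labelA,labelB): canonical_index}
--     """
--     all_pairs = set()
--     for distances, _ in distances_list_of_files:
--         for _, a1, a2, label1, label2, _ in distances:
--             pair = tuple(sorted([label1, label2]))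
--             all_pairs.add(pair)
--     sorted_pairs = sorted(all_pairs)
--     mapping = OrderedDict((pair, i + 1) for i, pair in enumerate(sorted_pairs))
--     return mapping
-- ===== SOURCE B (Python) =====
-- from collections import OrderedDict
--
-- def canonical_mapping_from_distances(distances_list_of_files):
--     """
--     Build canonical ordering for all unique label pairs across input lists.
--     Returns OrderedDict: {(labelA,labelB): canonical_index}
--     Strategy: dedup pairs into a dict in first-seen order (no set), then instead
--     of sorting, repeatedly SELECT the minimum remaining pair, remove it, and
--     assign it the next index (selection-based extraction, no library sort).
--     """
--     distinct = {}
--     for distances, _ in distances_list_of_files: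
--         for _, a1, a2, label1, label2, _ in distances:
--             if label1 <= label2:
--                 distinct[(label1, label2)] = True
--             else:
--                 distinct[(label2, label1)] = True
--     remaining = list(distinct)
--     mapping = OrderedDict()
--     idx = 0
--     while remaining:
--         m = remaining[0]
--         for q in remaining:
--             if q < m:
--                 m = q
--         remaining.remove(m)
--         idx += 1
--         mapping[m] = idx
--     return mapping
-- ===== Notes on version B (the rewrite author's own statement) =====
-- stated objective: alternative
-- what changed: Replaces A's hash-set dedup plus library sort plus enumerate with a first-seen dict dedup followed by selection-based extraction: repeatedly scan the remaining pairs for the minimum, remove it, and assign it the next index, so no sort call and no set are used.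
import Mathlib
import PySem

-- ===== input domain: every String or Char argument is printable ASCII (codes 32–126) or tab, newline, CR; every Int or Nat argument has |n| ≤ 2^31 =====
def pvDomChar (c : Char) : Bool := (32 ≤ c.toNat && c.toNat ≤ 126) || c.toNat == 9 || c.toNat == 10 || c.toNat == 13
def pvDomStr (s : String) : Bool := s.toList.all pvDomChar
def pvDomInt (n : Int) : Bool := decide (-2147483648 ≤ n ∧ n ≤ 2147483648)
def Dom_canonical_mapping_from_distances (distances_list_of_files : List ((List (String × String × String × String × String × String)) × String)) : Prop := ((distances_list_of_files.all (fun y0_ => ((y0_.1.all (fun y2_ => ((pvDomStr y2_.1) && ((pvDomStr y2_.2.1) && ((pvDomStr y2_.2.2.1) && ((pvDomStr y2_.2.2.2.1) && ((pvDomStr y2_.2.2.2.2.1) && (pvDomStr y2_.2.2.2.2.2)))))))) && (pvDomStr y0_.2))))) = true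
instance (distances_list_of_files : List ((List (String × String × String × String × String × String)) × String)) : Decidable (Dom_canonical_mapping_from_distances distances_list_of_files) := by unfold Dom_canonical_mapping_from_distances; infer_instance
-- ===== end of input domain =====

-- B replaces A's set-dedup + library sort + enumerate by a first-seen dict dedup followed by
-- selection-based extraction of successive minima (no sort call): alternative algorithm, same result.


-- ===== PORT A =====
-- tuple(sorted([a, b])): Python's stable sort of the two-element list [a, b]
def pvPairSorted (a b : String) : String × String :=
  if b < a then (b, a) else (a, b)

def canonical_mapping_from_distances (distances_list_of_files : List ((List (String × String × String × String × String × String)) × String)) : List (String × String × Int) :=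
  let all_pairs : PySem.Set (String × String) :=
    distances_list_of_files.foldl (fun s df =>
      df.1.foldl (fun s t => PySem.Set.add s (pvPairSorted t.2.2.2.1 t.2.2.2.2.1)) s)
      PySem.Set.empty
  let sorted_pairs := PySem.List.sorted2 all_pairs (fun p => p.1) (fun p => p.2)
  -- OrderedDict((pair, i+1) for i, pair in enumerate(sorted_pairs)): the keys are the
  -- elements of a sorted set, pairwise distinct, so the dict IS its insertion list
  (PySem.List.enumerate sorted_pairs 0).map (fun q => (q.2.1, q.2.2, q.1 + 1))

-- ===== PORT B =====
-- Python tuple comparison (labelA, labelB) < (labelA', labelB'): lexicographic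
def pvKey (p : String × String) : Lex (String × String) := toLex p

-- the 'while remaining:' loop of Source B: scan remaining for the minimum pair m,
-- remaining.remove(m), idx += 1, mapping[m] = idx (each key recorded is new, so the
-- OrderedDict is its insertion list)
def pvSelect : List (String × String) → Int → List (String × String × Int)
  | [], _ => []
  | r :: rest, idx =>
    let m := (r :: rest).foldl (fun m q => if pvKey q < pvKey m then q else m) r
    match h : PySem.List.remove? (r :: rest) m with
    | some remaining' => (m.1, m.2, idx + 1) :: pvSelect remaining' (idx + 1)
    | none => []  -- unreachable: m is an element of remaining, so .remove succeeds
  termination_by l _ => l.length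
  decreasing_by
    have hm : m ∈ r :: rest := by
      by_contra hmem
      exact Option.some_ne_none remaining'
        (h.symm.trans ((PySem.List.remove?_eq_none_iff (r :: rest) m).mpr hmem))
    have h2 : remaining' = (r :: rest).erase m :=
      Option.some.inj (h.symm.trans (PySem.List.remove?_eq_some_erase (r :: rest) m hm))
    have h3 := List.length_erase_of_mem hm
    rw [h2]
    simp only [List.length_cons] at h3 ⊢
    omega

def canonical_mapping_from_distances_alt (distances_list_of_files : List ((List (String × String × String × String × String × String)) × String)) : List (String × String × Int) :=
  let distinct : PySem.Dict (String × String) Bool :=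
    distances_list_of_files.foldl (fun d df =>
      df.1.foldl (fun d t =>
        if t.2.2.2.1 ≤ t.2.2.2.2.1 then PySem.Dict.insert d (t.2.2.2.1, t.2.2.2.2.1) true
        else PySem.Dict.insert d (t.2.2.2.2.1, t.2.2.2.1) true) d)
      PySem.Dict.empty
  pvSelect (PySem.Dict.keys distinct) 0

-- ===== PRECONDITION & SPEC =====
def Spec_canonical_mapping_from_distances (distances_list_of_files : List ((List (String × String × String × String × String × String)) × String)) (out : List (String × String × Int)) : Prop := out = canonical_mapping_from_distances_alt distances_list_of_files
instance (distances_list_of_files : List ((List (String × String × String × String × String × String)) × String)) (out : List (String × String × Int)) : Decidable (Spec_canonical_mapping_from_distances distances_list_of_files out) := by unfold Spec_canonical_mapping_from_distances; infer_instance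

-- ===== CLAIM (what is proved, stated in full; the proofs are below) =====
def Claim_equal_canonical_mapping_from_distances : Prop := ∀ (distances_list_of_files : List ((List (String × String × String × String × String × String)) × String)), Dom_canonical_mapping_from_distances distances_list_of_files → Spec_canonical_mapping_from_distances distances_list_of_files (canonical_mapping_from_distances distances_list_of_files)

-- ===== LEMMAS AND PROOFS =====

-- the canonicalised pair a row contributes
def pvF (t : String × String × String × String × String × String) : String × String :=
  pvPairSorted t.2.2.2.1 t.2.2.2.2.1

lemma pvKey_inj {p q : String × String} (h : pvKey p = pvKey q) : p = q := by
  simpa [pvKey] using h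

lemma pvPairSorted_eq (a b : String) :
    pvPairSorted a b = if a ≤ b then (a, b) else (b, a) := by
  unfold pvPairSorted
  by_cases h : a ≤ b
  · rw [if_neg (not_lt.mpr h), if_pos h]
  · rw [if_pos (not_le.mp h), if_neg h]

-- sorting by the tuple key (fst, snd) is sorting by the lexicographic key
lemma pvSorted2_eq (xs : List (String × String)) :
    PySem.List.sorted2 xs (fun p => p.1) (fun p => p.2) = PySem.List.sorted xs pvKey := by
  unfold PySem.List.sorted2 PySem.List.sorted
  simp only [Bool.false_eq_true, if_false]
  congr 1
  funext acc x
  congr 1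
  funext a b
  apply Bool.eq_iff_iff.mpr
  simp only [Bool.or_eq_true, Bool.and_eq_true, Bool.not_eq_true', decide_eq_true_eq,
    decide_eq_false_iff_not, pvKey, Prod.Lex.lt_iff, ofLex_toLex]
  constructor
  · rintro (h | ⟨h1, h2⟩)
    · exact Or.inl h
    · rcases lt_trichotomy a.1 b.1 with h | h | h
      · exact Or.inl h
      · exact Or.inr ⟨h, h2⟩
      · exact absurd h h1
  · rintro (h | ⟨h1, h2⟩)
    · exact Or.inl h
    · exact Or.inr ⟨by rw [h1]; exact lt_irrefl _, h2⟩

-- the flat list of canonicalised pairs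
def pvFlat (L : List ((List (String × String × String × String × String × String)) × String)) : List (String × String) :=
  L.flatMap (fun df => df.1.map pvF)

-- a nested per-pair fold is the fold over the flat pair list
lemma pvNested {β : Type} (f : β → (String × String) → β)
    (L : List ((List (String × String × String × String × String × String)) × String)) (init : β) :
    L.foldl (fun b df => df.1.foldl (fun b t => f b (pvF t)) b) init
      = (pvFlat L).foldl f init := by
  induction L generalizing init with
  | nil => rfl
  | cons df rest ih =>
    simp only [List.foldl_cons, pvFlat, List.flatMap_cons, List.foldl_append, List.foldl_map]
    exact ih _

-- A's set-building nested fold is set(pvFlat L)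
lemma pvFoldA (L : List ((List (String × String × String × String × String × String)) × String)) :
    L.foldl (fun s df =>
        df.1.foldl (fun s t => PySem.Set.add s (pvPairSorted t.2.2.2.1 t.2.2.2.2.1)) s)
      PySem.Set.empty
      = PySem.Set.ofList (pvFlat L) := by
  rw [show (fun (s : PySem.Set (String × String)) (t : String × String × String × String × String × String) => PySem.Set.add s (pvPairSorted t.2.2.2.1 t.2.2.2.2.1))
      = (fun s t => PySem.Set.add s (pvF t)) from rfl,
    pvNested PySem.Set.add L PySem.Set.empty, PySem.Set.ofList_eq_foldl]
  rfl

-- B's dict-building nested fold has keys set(pvFlat L) too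
lemma pvFoldB (L : List ((List (String × String × String × String × String × String)) × String)) :
    PySem.Dict.keys (L.foldl (fun d df =>
        df.1.foldl (fun d t =>
          if t.2.2.2.1 ≤ t.2.2.2.2.1 then PySem.Dict.insert d (t.2.2.2.1, t.2.2.2.2.1) true
          else PySem.Dict.insert d (t.2.2.2.2.1, t.2.2.2.1) true) d)
      PySem.Dict.empty)
      = PySem.Set.ofList (pvFlat L) := by
  have hb : (fun (d : PySem.Dict (String × String) Bool) (t : String × String × String × String × String × String) =>
        if t.2.2.2.1 ≤ t.2.2.2.2.1 then PySem.Dict.insert d (t.2.2.2.1, t.2.2.2.2.1) true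
        else PySem.Dict.insert d (t.2.2.2.2.1, t.2.2.2.1) true)
      = (fun d t => PySem.Dict.insert d (pvF t) true) := by
    funext d t
    rw [pvF, pvPairSorted_eq]
    by_cases h : t.2.2.2.1 ≤ t.2.2.2.2.1 <;> simp [h]
  rw [hb, pvNested (fun d p => PySem.Dict.insert d p true) L PySem.Dict.empty]
  rw [show (fun (d : PySem.Dict (String × String) Bool) (p : String × String) => PySem.Dict.insert d p true)
      = (fun d p => PySem.Dict.insert d p ((fun (_ : PySem.Dict (String × String) Bool) (_ : String × String) => true) d p)) from rfl]
  rw [PySem.Dict.keys_foldl_insert]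
  rw [show PySem.Dict.keys (PySem.Dict.empty : PySem.Dict (String × String) Bool) = [] from rfl]
  exact PySem.Set.update_nil_left _

-- the inner for-loop of Source B finds a minimal element of the list
lemma pvMinFold (l : List (String × String)) (m0 : String × String) :
    (l.foldl (fun m q => if pvKey q < pvKey m then q else m) m0 = m0
        ∨ l.foldl (fun m q => if pvKey q < pvKey m then q else m) m0 ∈ l)
      ∧ pvKey (l.foldl (fun m q => if pvKey q < pvKey m then q else m) m0) ≤ pvKey m0
      ∧ ∀ q ∈ l, pvKey (l.foldl (fun m q => if pvKey q < pvKey m then q else m) m0) ≤ pvKey q := by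
  induction l generalizing m0 with
  | nil => simp
  | cons x xs ih =>
    simp only [List.foldl_cons, List.mem_cons]
    by_cases h : pvKey x < pvKey m0
    · rw [if_pos h]
      rcases ih x with ⟨hmem, hle, hall⟩
      refine ⟨Or.inr ?_, le_trans hle (le_of_lt h), fun q hq => ?_⟩
      · rcases hmem with he | hi
        · exact Or.inl he
        · exact Or.inr hi
      · rcases hq with rfl | hq
        · exact hle
        · exact hall q hq
    · rw [if_neg h]
      rcases ih m0 with ⟨hmem, hle, hall⟩
      refine ⟨?_, hle, fun q hq => ?_⟩
      · rcases hmem with he | hi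
        · exact Or.inl he
        · exact Or.inr (Or.inr hi)
      · rcases hq with rfl | hq
        · exact le_trans hle (not_lt.mp h)
        · exact hall q hq

-- nodup lists of pairs have pairwise-distinct keys under sorting
lemma pvSorted_pairwise_lt (R : List (String × String)) (hnd : R.Nodup) :
    (PySem.List.sorted R pvKey).Pairwise (fun a b => pvKey a < pvKey b) := by
  have hle := PySem.List.sorted_pairwise R pvKey
  have hnd' : (PySem.List.sorted R pvKey).Nodup :=
    (PySem.List.sorted_perm R pvKey false).nodup_iff.mpr hnd
  have hne : (PySem.List.sorted R pvKey).Pairwise (fun a b => a ≠ b) := hnd'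
  exact (hle.and hne).imp (fun ⟨h1, h2⟩ => lt_of_le_of_ne h1 (fun he => h2 (pvKey_inj he)))

-- selecting the minimum m splits sorted R as m :: sorted (R.erase m)
lemma pvSorted_cons_min (R : List (String × String)) (m : String × String)
    (hnd : R.Nodup) (hm : m ∈ R) (hmin : ∀ q ∈ R, pvKey m ≤ pvKey q) :
    PySem.List.sorted R pvKey = m :: PySem.List.sorted (R.erase m) pvKey := by
  apply PySem.List.sorted_eq_of_perm_of_pairwise_lt
  · exact ((PySem.List.sorted_perm (R.erase m) pvKey false).cons m).trans
      (List.perm_cons_erase hm).symm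
  · refine List.pairwise_cons.mpr ⟨fun y hy => ?_, pvSorted_pairwise_lt _ (hnd.erase m)⟩
    have hy' : y ∈ R.erase m := (PySem.List.mem_sorted _ _ _ _).mp hy
    have hyR : y ∈ R := List.mem_of_mem_erase hy'
    have hyne : y ≠ m := (List.Nodup.mem_erase_iff hnd).mp hy' |>.1
    exact lt_of_le_of_ne (hmin y hyR) (fun he => hyne (pvKey_inj he).symm)

-- the selection loop produces exactly sorted R with 1-based indices
lemma pvSelect_eq (R : List (String × String)) (idx : Int) (hnd : R.Nodup) :
    pvSelect R idx
      = (PySem.List.enumerate (PySem.List.sorted R pvKey) idx).map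
          (fun q => (q.2.1, q.2.2, q.1 + 1)) := by
  induction hlen : R.length using Nat.strong_induction_on generalizing R idx with
  | _ n ih =>
    cases R with
    | nil => rw [pvSelect.eq_def]; rfl
    | cons r rest =>
      rw [pvSelect.eq_def]
      dsimp only
      rw [List.foldl_cons, if_neg (lt_irrefl (pvKey r))]
      rcases pvMinFold rest r with ⟨hmem0, hle0, hall0⟩
      set m := rest.foldl (fun m q => if pvKey q < pvKey m then q else m) r with hmdef
      have hm : m ∈ r :: rest := by
        rcases hmem0 with he | hi
        · exact he ▸ List.mem_cons_self
        · exact List.mem_cons_of_mem _ hi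
      have hmin : ∀ q ∈ r :: rest, pvKey m ≤ pvKey q := by
        intro q hq
        rcases List.mem_cons.mp hq with rfl | hq
        · exact hle0
        · exact hall0 q hq
      split
      next remaining' heq =>
        have h2 : remaining' = (r :: rest).erase m :=
          Option.some.inj
            (heq.symm.trans (PySem.List.remove?_eq_some_erase (r :: rest) m hm))
        subst h2
        have hlt : ((r :: rest).erase m).length < n := by
          have h3 := List.length_erase_of_mem hm
          simp only [List.length_cons] at h3 hlen
          omega
        rw [ih _ hlt _ (idx + 1) (hnd.erase m) rfl,
          pvSorted_cons_min (r :: rest) m hnd hm hmin, PySem.List.enumerate_cons]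
        rfl
      next heq =>
        exact absurd hm ((PySem.List.remove?_eq_none_iff (r :: rest) m).mp heq)

-- ===== VERDICT (by name: the statement is the Claim_ definition above) =====
theorem canonical_mapping_from_distances_spec : Claim_equal_canonical_mapping_from_distances := by
  intro L _
  unfold Spec_canonical_mapping_from_distances
  simp only [canonical_mapping_from_distances, canonical_mapping_from_distances_alt]
  rw [pvFoldA L, pvFoldB L, pvSorted2_eq,
    pvSelect_eq _ 0 (PySem.Set.nodup_ofList (pvFlat L))]
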